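-- pv_equiv track=rewrite | github.com/chjacob-tubs/pyadf-releases | src/pyadf/kf/kf.py | stringForData
-- ===== SOURCE A (Python) =====
-- def stringForData(data):
--     count = 0
--     s = ""
--     for ll in data:
--         if count == 80:
--             s = s + "\n"
--             count = 0
--         count = count + 1
--         if ll:
--             s = s + "T"
--         else:
--             s = s + "F"
--     return s
-- ===== SOURCE B (Python) =====
-- def stringForData(data):
--     s = ''.join('T' if ll else 'F' for ll in data)
--     chunks = []
--     while s:
--         chunks.append(s[:80])
--         s = s[80:]
--     return '\n'.join(chunks)
-- ===== Notes on version B (the rewrite author's own statement) =====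
-- stated objective: simpler
-- what changed: Replaces A's single pass with a running counter and inline newline branch by a two-phase strategy: build the whole 'T'/'F' string first, then chunk it into 80-character slices joined with '\n'.
import Mathlib
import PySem

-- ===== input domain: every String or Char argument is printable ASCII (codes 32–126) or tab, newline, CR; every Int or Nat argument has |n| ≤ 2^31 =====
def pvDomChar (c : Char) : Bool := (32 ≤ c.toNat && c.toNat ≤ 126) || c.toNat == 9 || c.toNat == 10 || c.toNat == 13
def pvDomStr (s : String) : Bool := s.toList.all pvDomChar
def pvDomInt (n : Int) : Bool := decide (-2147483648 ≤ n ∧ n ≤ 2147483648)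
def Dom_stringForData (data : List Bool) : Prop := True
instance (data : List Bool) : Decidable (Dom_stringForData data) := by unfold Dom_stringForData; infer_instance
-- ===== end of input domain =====

-- B replaces A's single pass with a running counter and inline newline branch by a two-phase
-- build-then-chunk strategy ('T'/'F' string first, then 80-char slices joined by '\n'); objective: simpler.

-- ===== PORT A =====
-- literal transliteration: the for-loop is a foldl over the state (count, s), branches in A's order
def stringForData (data : List Bool) : String :=
  (data.foldl (fun (st : Int × String) ll =>
      let count := st.1
      let s := st.2
      let (count, s) := if count == 80 then ((0 : Int), s ++ "\n") else (count, s)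
      ((count + 1 : Int), s ++ (if ll then "T" else "F")))
    ((0 : Int), "")).2

-- ===== PORT B =====
-- the while-loop of Source B: chunk the char list into pieces of 80 (s[:80] / s[80:] on a
-- nonnegative bound are exactly take 80 / drop 80 — PySem.List.slice_to / slice_from)
def chunksB (cs : List Char) : List (List Char) :=
  if cs = [] then [] else cs.take 80 :: chunksB (cs.drop 80)
termination_by cs.length
decreasing_by
  rename_i h
  have : cs.length ≠ 0 := fun h0 => h (List.length_eq_zero_iff.mp h0)
  simp [List.length_drop]; omega

def stringForData_alt (data : List Bool) : String :=
  -- s = ''.join('T' if ll else 'F' for ll in data); then '\n'.join of the 80-char chunks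
  let cs := data.map (fun ll => if ll then 'T' else 'F')
  String.ofList (PySem.Chars.join ['\n'] (chunksB cs))

-- ===== PRECONDITION & SPEC =====
def Spec_stringForData (data : List Bool) (out : String) : Prop := out = stringForData_alt data
instance (data : List Bool) (out : String) : Decidable (Spec_stringForData data out) := by unfold Spec_stringForData; infer_instance

-- ===== CLAIM (what is proved, stated in full; the proofs are below) =====
def Claim_equal_stringForData : Prop := ∀ (data : List Bool), Dom_stringForData data → Spec_stringForData data (stringForData data)

-- ===== LEMMAS AND PROOFS =====

-- A's loop body, named so the proof can talk about one step
def stepA (st : Int × String) (c : Char) : Int × String :=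
  let count := st.1
  let s := st.2
  let (count, s) := if count == 80 then ((0 : Int), s ++ "\n") else (count, s)
  ((count + 1 : Int), s ++ String.ofList [c])

lemma stepA_at80 (s : String) (c : Char) :
    stepA (80, s) c = (1, s ++ "\n" ++ String.ofList [c]) := by
  simp [stepA]

lemma stepA_lt (count : Int) (s : String) (c : Char) (h : ¬ count = 80) :
    stepA (count, s) c = (count + 1, s ++ String.ofList [c]) := by
  simp [stepA, h]

-- reference chunked string: r = chars still allowed before the next newline is due
def chunkStr : List Char → Nat → List Char
  | [], _ => []
  | c :: cs, 0 => '\n' :: c :: chunkStr cs 79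
  | c :: cs, r + 1 => c :: chunkStr cs r

lemma chunkStr_take_drop (cs : List Char) :
    ∀ r, chunkStr cs r =
      cs.take r ++ (if cs.drop r = [] then [] else '\n' :: chunkStr (cs.drop r) 80) := by
  induction cs with
  | nil => intro r; simp [chunkStr]
  | cons c cs ih =>
    intro r
    cases r with
    | zero => simp [chunkStr]
    | succ r => simpa [chunkStr] using ih r

lemma chunksB_eq_nil_iff (cs : List Char) : chunksB cs = [] ↔ cs = [] := by
  rw [chunksB]; split_ifs with h <;> simp [h]

lemma join_cons (sep a : List Char) (l : List (List Char)) :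
    PySem.Chars.join sep (a :: l) =
      a ++ (if l = [] then [] else sep ++ PySem.Chars.join sep l) := by
  cases l with
  | nil => simp [PySem.Chars.join_singleton]
  | cons b l => simp [PySem.Chars.join_cons_cons]

lemma join_chunksB (cs : List Char) :
    PySem.Chars.join ['\n'] (chunksB cs) = chunkStr cs 80 := by
  induction cs using chunksB.induct with
  | case1 =>
    simp [chunksB, PySem.Chars.join_nil, chunkStr]
  | case2 cs h ih =>
    rw [chunksB, if_neg h, join_cons, chunkStr_take_drop cs 80, ih]
    by_cases hd : cs.drop 80 = []
    · rw [if_pos ((chunksB_eq_nil_iff _).mpr hd), if_pos hd]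
    · rw [if_neg (fun hh => hd ((chunksB_eq_nil_iff _).mp hh)), if_neg hd]
      rfl

lemma foldA_chunk (cs : List Char) :
    ∀ (r : Nat) (acc : List Char), r ≤ 80 →
      (cs.foldl stepA (((80 : Int) - r, String.ofList acc))).2 =
        String.ofList (acc ++ chunkStr cs r) := by
  induction cs with
  | nil => intro r acc _; simp [chunkStr]
  | cons c cs ih =>
    intro r acc hr
    cases r with
    | zero =>
      have h0 : ((80 : Int) - ((0 : Nat) : Int), String.ofList acc) = ((80 : Int), String.ofList acc) := by
        norm_num
      rw [List.foldl_cons, h0, stepA_at80]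
      have h1 : (1 : Int) = (80 : Int) - (79 : Nat) := by norm_num
      have h2 : String.ofList acc ++ "\n" ++ String.ofList [c] = String.ofList (acc ++ ['\n', c]) := by
        rw [show ("\n" : String) = String.ofList ['\n'] from rfl, ← String.ofList_append,
          ← String.ofList_append, List.append_assoc]
        rfl
      rw [h1, h2, ih 79 (acc ++ ['\n', c]) (by omega)]
      simp [chunkStr]
    | succ r =>
      have hne : ¬ ((80 : Int) - ((r + 1 : Nat) : Int)) = 80 := by push_cast; omega
      rw [List.foldl_cons, stepA_lt _ _ _ hne]
      have h1 : (80 : Int) - ((r + 1 : Nat) : Int) + 1 = (80 : Int) - (r : Nat) := by push_cast; ring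
      have h2 : String.ofList acc ++ String.ofList [c] = String.ofList (acc ++ [c]) := by
        rw [← String.ofList_append]
      rw [h1, h2, ih r (acc ++ [c]) (by omega)]
      simp [chunkStr]

lemma foldA_eq_map (data : List Bool) :
    stringForData data =
      ((data.map (fun ll => if ll then 'T' else 'F')).foldl stepA ((0 : Int), String.ofList [])).2 := by
  unfold stringForData
  rw [List.foldl_map]
  have hfun : (fun (st : Int × String) (ll : Bool) =>
      let count := st.1
      let s := st.2
      let (count, s) := if count == 80 then ((0 : Int), s ++ "\n") else (count, s)
      ((count + 1 : Int), s ++ (if ll then "T" else "F")))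
      = fun (st : Int × String) (ll : Bool) => stepA st (if ll then 'T' else 'F') := by
    funext st ll
    cases ll <;> rfl
  rw [hfun]

-- ===== VERDICT (by name: the statement is the Claim_ definition above) =====
theorem stringForData_spec : Claim_equal_stringForData := by
  intro data _
  show stringForData data = stringForData_alt data
  rw [foldA_eq_map]
  show _ = String.ofList (PySem.Chars.join ['\n'] (chunksB (data.map (fun ll => if ll then 'T' else 'F'))))
  rw [join_chunksB]
  have h := foldA_chunk (data.map (fun ll => if ll then 'T' else 'F')) 80 [] (le_refl 80)
  simpa using h
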